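-- pv_equiv track=rewrite | github.com/aleattene/checkers | checkers_game/move.py | check_syntax_move
-- ===== SOURCE A (Python) =====
-- def check_syntax_move(move):
--     if move == "":
--         return True, True
--     elif len(move) % 2 != 0:
--         return False, False
--     else:
--         for i in range(0, len(move), 2):
--             if not("A" <= move[i].upper() <= "H") or not("1" <= move[i+1] <= "8"):
--                 return False, False
--     return True, False
-- ===== SOURCE B (Python) =====
-- LETTERS = "ABCDEFGHabcdefgh"
-- DIGITS = "12345678"
--
--
-- def _pairs_ok(s):
--     # consume one (letter, digit) pair from the front per step; an odd leftover fails
--     while len(s) >= 2: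
--         if s[0] not in LETTERS or s[1] not in DIGITS:
--             return False
--         s = s[2:]
--     return s == ""
--
--
-- def check_syntax_move(move):
--     if move == "":
--         return True, True
--     return _pairs_ok(move), False
-- ===== Notes on version B (the rewrite author's own statement) =====
-- stated objective: simpler
-- what changed: Replaces the even-length check plus step-2 index loop with .upper() range comparisons by a direct recursion that consumes one (letter, digit) pair from the front per step using membership in literal character sets; odd lengths fail on the leftover single character, so the parity check disappears.
import Mathlib
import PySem

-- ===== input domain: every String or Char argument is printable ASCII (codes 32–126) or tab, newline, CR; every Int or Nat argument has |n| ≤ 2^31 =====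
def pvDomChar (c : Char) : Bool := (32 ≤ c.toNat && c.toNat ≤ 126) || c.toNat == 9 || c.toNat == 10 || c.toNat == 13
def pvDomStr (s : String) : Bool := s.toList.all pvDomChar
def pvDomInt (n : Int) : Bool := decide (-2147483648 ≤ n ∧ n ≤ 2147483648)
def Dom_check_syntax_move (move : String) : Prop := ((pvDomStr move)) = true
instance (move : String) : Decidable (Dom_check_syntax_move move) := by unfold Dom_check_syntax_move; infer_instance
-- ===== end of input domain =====

-- B replaces A's parity check + step-2 index loop (with .upper() range tests) by a
-- front-consuming recursion over (letter, digit) pairs using character-set membership; simpler, same cost.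

-- ===== PORT A =====
-- the step-2 index loop of A; the `| _, _ => …` branch is Python's IndexError and is
-- unreachable for the in-range indices A generates (len even, i ≤ len - 2)
def pvALoop (cs : List Char) : List Int → Bool × Bool
  | [] => (true, false)
  | i :: rest =>
    match PySem.List.pyGet? cs i, PySem.List.pyGet? cs (i + 1) with
    | some c1, some c2 =>
      if ¬('A' ≤ PySem.Chars.upperChar c1 ∧ PySem.Chars.upperChar c1 ≤ 'H') ∨
         ¬('1' ≤ c2 ∧ c2 ≤ '8') then (false, false)
      else pvALoop cs rest
    | _, _ => (false, false)

def check_syntax_move (move : String) : Bool × Bool :=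
  let cs := move.toList
  if cs = [] then (true, true)
  else if PySem.Int.mod (cs.length : Int) 2 ≠ 0 then (false, false)
  else pvALoop cs (PySem.List.pyRange 0 (cs.length : Int) 2)

-- ===== PORT B =====
def pvPairsOk : List Char → Bool
  | [] => true
  | [_] => false
  | c1 :: c2 :: rest =>
    "ABCDEFGHabcdefgh".toList.contains c1 && "12345678".toList.contains c2 && pvPairsOk rest

def check_syntax_move_alt (move : String) : Bool × Bool :=
  if move.toList = [] then (true, true)
  else (pvPairsOk move.toList, false)

-- ===== PRECONDITION & SPEC =====
def Spec_check_syntax_move (move : String) (out : Bool × Bool) : Prop := out = check_syntax_move_alt move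
instance (move : String) (out : Bool × Bool) : Decidable (Spec_check_syntax_move move out) := by unfold Spec_check_syntax_move; infer_instance

-- ===== CLAIM (what is proved, stated in full; the proofs are below) =====
def Claim_equal_check_syntax_move : Prop := ∀ (move : String), Dom_check_syntax_move move → Spec_check_syntax_move move (check_syntax_move move)

-- ===== LEMMAS AND PROOFS =====

-- on the ASCII domain, A's `"A" <= c.upper() <= "H"` is exactly membership in B's letter set
theorem pvLetterChar (c : Char) (h : pvDomChar c = true) :
    (decide ('A' ≤ PySem.Chars.upperChar c ∧ PySem.Chars.upperChar c ≤ 'H'))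
      = "ABCDEFGHabcdefgh".toList.contains c := by
  have h128 : c.toNat < 128 := by
    simp [pvDomChar] at h
    omega
  have key : ∀ n : Nat, n < 128 →
      (decide ('A' ≤ PySem.Chars.upperChar (Char.ofNat n) ∧ PySem.Chars.upperChar (Char.ofNat n) ≤ 'H'))
        = "ABCDEFGHabcdefgh".toList.contains (Char.ofNat n) := by decide
  have := key c.toNat h128
  rwa [Char.ofNat_toNat] at this

-- A's `"1" <= c <= "8"` is exactly membership in B's digit set (ASCII domain)
theorem pvDigitChar (c : Char) (h : pvDomChar c = true) :
    (decide ('1' ≤ c ∧ c ≤ '8')) = "12345678".toList.contains c := by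
  have h128 : c.toNat < 128 := by
    simp [pvDomChar] at h
    omega
  have key : ∀ n : Nat, n < 128 →
      (decide ('1' ≤ Char.ofNat n ∧ Char.ofNat n ≤ '8'))
        = "12345678".toList.contains (Char.ofNat n) := by decide
  have := key c.toNat h128
  rwa [Char.ofNat_toNat] at this

theorem pvPairsOk_odd (cs : List Char) (h : cs.length % 2 = 1) : pvPairsOk cs = false := by
  induction cs using pvPairsOk.induct with
  | case1 => simp at h
  | case2 c => rfl
  | case3 c1 c2 rest ih =>
    simp only [List.length_cons] at h
    simp [pvPairsOk]
    intro _ _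
    exact ih (by omega)

theorem pvRange2_nil (a b : Int) (h : b ≤ a) : PySem.List.pyRange a b 2 = [] := by
  rw [PySem.List.pyRange_of_pos a b (by norm_num)]
  simp [show ¬ a < b by omega]

theorem pvRange2_cons (a b : Int) (h : a < b) :
    PySem.List.pyRange a b 2 = a :: PySem.List.pyRange (a + 2) b 2 := by
  rw [PySem.List.pyRange_of_pos a b (by norm_num), PySem.List.pyRange_of_pos (a + 2) b (by norm_num)]
  have hn : (if a < b then ((b - a + 2 - 1) / 2).toNat else 0)
      = (if a + 2 < b then ((b - (a + 2) + 2 - 1) / 2).toNat else 0) + 1 := by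
    split_ifs <;> omega
  rw [hn, List.range_succ_eq_map]
  simp [List.map_map, Function.comp]
  intro k _
  ring

theorem pvLoopMain (cs : List Char) (hdom : ∀ c ∈ cs, pvDomChar c = true) :
    ∀ (k i : Nat), cs.length = i + 2 * k →
      pvALoop cs (PySem.List.pyRange (i : Int) (cs.length : Int) 2) = (pvPairsOk (cs.drop i), false) := by
  intro k
  induction k with
  | zero =>
    intro i hlen
    rw [pvRange2_nil _ _ (by exact_mod_cast Int.ofNat_le.mpr (by omega))]
    rw [List.drop_of_length_le (by omega)]
    rfl
  | succ k ih =>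
    intro i hlen
    have hi : i < cs.length := by omega
    have hi1 : i + 1 < cs.length := by omega
    have hget1 : PySem.List.pyGet? cs (i : Int) = some cs[i] := by
      simp [List.getElem?_eq_getElem hi]
    have hget2 : PySem.List.pyGet? cs ((i : Int) + 1) = some cs[i + 1] := by
      rw [PySem.List.pyGet?_of_nonneg cs (by positivity)]
      have hc : ((i : Int) + 1).toNat = i + 1 := by omega
      rw [hc, List.getElem?_eq_getElem hi1]
    have hdrop : cs.drop i = cs[i] :: cs[i + 1] :: cs.drop (i + 2) := by
      rw [List.drop_eq_getElem_cons hi, List.drop_eq_getElem_cons hi1]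
    have hl := pvLetterChar cs[i] (hdom _ (List.getElem_mem hi))
    have hd := pvDigitChar cs[i + 1] (hdom _ (List.getElem_mem hi1))
    have hrec : pvALoop cs (PySem.List.pyRange ((i : Int) + 2) (cs.length : Int) 2)
        = (pvPairsOk (cs.drop (i + 2)), false) := by
      have hc : ((i : Int) + 2) = ((i + 2 : Nat) : Int) := by push_cast; ring
      rw [hc]
      exact ih (i + 2) (by omega)
    rw [pvRange2_cons _ _ (by exact_mod_cast Int.ofNat_lt.mpr hi)]
    have hstep : pvALoop cs ((i : Int) :: PySem.List.pyRange ((i : Int) + 2) (cs.length : Int) 2)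
        = (if ¬('A' ≤ PySem.Chars.upperChar cs[i] ∧ PySem.Chars.upperChar cs[i] ≤ 'H') ∨
              ¬('1' ≤ cs[i + 1] ∧ cs[i + 1] ≤ '8') then (false, false)
           else pvALoop cs (PySem.List.pyRange ((i : Int) + 2) (cs.length : Int) 2)) := by
      simp [pvALoop, hget1, hget2]
    rw [hstep, hdrop]
    have hpp : pvPairsOk (cs[i] :: cs[i + 1] :: cs.drop (i + 2))
        = ("ABCDEFGHabcdefgh".toList.contains cs[i] && "12345678".toList.contains cs[i + 1] && pvPairsOk (cs.drop (i + 2))) := rfl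
    rw [hpp, ← hl, ← hd]
    split_ifs with hcond
    · rcases hcond with h' | h'
      · simp [h']
      · simp [h']
    · push Not at hcond
      simp [hcond.1, hcond.2, hrec]

-- ===== VERDICT (by name: the statement is the Claim_ definition above) =====
theorem check_syntax_move_spec : Claim_equal_check_syntax_move := by
  intro move hdom
  unfold Spec_check_syntax_move check_syntax_move check_syntax_move_alt
  have hdom' : ∀ c ∈ move.toList, pvDomChar c = true := by
    simpa [Dom_check_syntax_move, pvDomStr, List.all_eq_true] using hdom
  by_cases hnil : move.toList = []
  · simp [hnil]
  · simp only [if_neg hnil]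
    by_cases hodd : move.toList.length % 2 = 1
    · have hm : PySem.Int.mod ((move.toList.length : Nat) : Int) 2 ≠ 0 := by
        rw [PySem.Int.mod_eq_emod_of_pos (by norm_num)]
        omega
      rw [if_pos hm, pvPairsOk_odd _ hodd]
    · have heven : move.toList.length % 2 = 0 := by omega
      have hm : ¬ PySem.Int.mod ((move.toList.length : Nat) : Int) 2 ≠ 0 := by
        rw [PySem.Int.mod_eq_emod_of_pos (by norm_num)]
        omega
      rw [if_neg hm]
      have hmain := pvLoopMain move.toList hdom' (move.toList.length / 2) 0 (by omega)
      simp only [Nat.cast_zero, List.drop_zero] at hmain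
      exact hmain
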